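-- pv_equiv track=rewrite | github.com/klocey/partitions | restricted_partitions.py | NrParts
-- ===== SOURCE A (Python) =====
-- def NrParts(N,S): # Find the number of partition for a given total N and number of parts S
--     # Recoded and modified from GAP source code: http://www.gap-system.org/
--
--     s=0
--     if N == S or S == 1:
--         s = 1
--     elif N < S or S == 0:
--         s = 0
--     else:
--         n = int(N)
--         k = int(S)
--         p = [1]*n
--
--         for i in range(2,k+1):
--             for m  in range(i+1,n-i+1+1):
--                 p[m] = p[m] + p[m-i]
--
--         s = p[n-k+1]
--
--     return s;
-- ===== SOURCE B (Python) =====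
-- def NrParts(N, S):  # number of partitions of N into exactly S parts
--     if N == S or S == 1:
--         return 1
--     if N < S or S == 0:
--         return 0
--     n, k = int(N), int(S)
--     # Build rows of the exactly-j-parts table: row[m] = P(m, j) with
--     # P(m, j) = P(m-1, j-1) + P(m-j, j); each row is built afresh by appending.
--     row = [1] + [0] * n          # row j = 0: only m = 0 has a partition
--     j = 1
--     while j <= k:
--         new = []
--         m = 0
--         while m <= n:
--             new.append(row[m - 1] + new[m - j] if m >= j else 0)
--             m += 1
--         row = new
--         j += 1
--     return row[n]
-- ===== Notes on version B (the rewrite author's own statement) =====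
-- stated objective: alternative
-- what changed: Replaces A's GAP-style in-place 1D prefix-update table over part sizes (for-loops doing p[m] += p[m-i] on one shared array) with while-loop-driven rows of the exactly-k-parts recurrence P(m,j) = P(m-1,j-1) + P(m-j,j), each row built afresh by appending.
import Mathlib
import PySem

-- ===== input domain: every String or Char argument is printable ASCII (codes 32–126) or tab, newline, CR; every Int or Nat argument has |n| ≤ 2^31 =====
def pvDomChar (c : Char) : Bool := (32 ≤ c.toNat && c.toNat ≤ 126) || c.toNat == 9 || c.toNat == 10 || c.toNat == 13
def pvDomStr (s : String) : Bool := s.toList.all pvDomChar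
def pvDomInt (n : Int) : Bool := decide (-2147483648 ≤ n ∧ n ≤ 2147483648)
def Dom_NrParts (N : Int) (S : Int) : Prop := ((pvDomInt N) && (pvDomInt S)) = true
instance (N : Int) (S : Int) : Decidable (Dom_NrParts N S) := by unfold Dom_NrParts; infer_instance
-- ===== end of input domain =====

-- B replaces A's in-place 1D prefix-update table over part sizes with while-loop-driven
-- rows of the exactly-k-parts recurrence P(m,j) = P(m-1,j-1) + P(m-j,j), each row built
-- afresh by appending; same asymptotic cost (objective: alternative).

-- ===== PORT A =====
def NrParts (N : Int) (S : Int) : Int :=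
  if N = S ∨ S = 1 then 1
  else if N < S ∨ S = 0 then 0
  else
    let n : Int := N
    let k : Int := S
    let p : List Int := List.replicate n.toNat 1
    let p := (PySem.List.pyRange 2 (k + 1) 1).foldl (fun p i =>
      (PySem.List.pyRange (i + 1) (n - i + 1 + 1) 1).foldl (fun q m =>
        PySem.List.pySetD q m (PySem.List.pyGetD q m 0 + PySem.List.pyGetD q (m - i) 0)) p) p
    PySem.List.pyGetD p (n - k + 1) 0

-- ===== PORT B =====
-- inner 'while m <= n' loop of Source B: fuel = number of remaining iterations
def pvInnerB (row : List Int) (j n : Int) : Nat → Int → List Int → List Int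
  | 0, _, new => new
  | c + 1, m, new =>
      pvInnerB row j n c (m + 1)
        (new ++ [if j ≤ m then
            PySem.List.pyGetD row (m - 1) 0 + PySem.List.pyGetD new (m - j) 0
          else 0])

-- outer 'while j <= k' loop of Source B
def pvOuterB (k n : Int) : Nat → Int → List Int → List Int
  | 0, _, row => row
  | c + 1, j, row => pvOuterB k n c (j + 1) (pvInnerB row j n (n + 1).toNat 0 [])

def NrParts_alt (N : Int) (S : Int) : Int :=
  if N = S ∨ S = 1 then 1
  else if N < S ∨ S = 0 then 0
  else
    let n : Int := N
    let k : Int := S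
    let row : List Int := 1 :: List.replicate n.toNat 0
    let row := pvOuterB k n k.toNat 1 row
    PySem.List.pyGetD row n 0

-- ===== PRECONDITION & SPEC =====
-- Pre_ excludes exactly the inputs with S < 0 and N > S, on which A raises IndexError
-- (p[n-k+1] with n-k+1 out of range); A returns on every input Pre_ admits.
def Pre_NrParts (N : Int) (S : Int) : Prop := 0 ≤ S ∨ N ≤ S
instance (N : Int) (S : Int) : Decidable (Pre_NrParts N S) := by unfold Pre_NrParts; infer_instance
def pvWitness_NrParts : Int × Int := (7, 3)

def Spec_NrParts (N : Int) (S : Int) (out : Int) : Prop := out = NrParts_alt N S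
instance (N : Int) (S : Int) (out : Int) : Decidable (Spec_NrParts N S out) := by unfold Spec_NrParts; infer_instance

-- ===== CLAIM (what is proved, stated in full; the proofs are below) =====
def Claim_equal_NrParts : Prop := ∀ (N : Int) (S : Int), Dom_NrParts N S → Pre_NrParts N S → Spec_NrParts N S (NrParts N S)

-- ===== LEMMAS AND PROOFS =====

-- Reference count: pcount n k = number of partitions of n into parts of size ≤ k.
def pcount : Nat → Nat → Int
  | 0, _ => 1
  | _ + 1, 0 => 0
  | n + 1, k + 1 => pcount (n + 1) k + (if k + 1 ≤ n + 1 then pcount (n - k) (k + 1) else 0)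
termination_by n k => (n, k)

theorem pcount_one (x : Nat) : pcount x 1 = 1 := by
  induction x with
  | zero => rw [pcount]
  | succ n ih =>
    rw [pcount]
    simp [pcount, ih]

theorem pcount_stable (x k : Nat) (h : x ≤ k) : pcount x (k + 1) = pcount x k := by
  match x, k, h with
  | 0, k, _ => rw [pcount]; rw [pcount]
  | j + 1, t + 1, h =>
    rw [pcount]
    have : ¬ (t + 1 + 1 ≤ j + 1) := by omega
    simp [this]

theorem pcount_step (x i : Nat) (h1 : 1 ≤ i) (h2 : i ≤ x) :
    pcount x i = pcount x (i - 1) + pcount (x - i) i := by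
  match x, i, h1, h2 with
  | 0, t + 1, _, h2 => omega
  | j + 1, t + 1, _, h2 =>
    rw [pcount]
    have : t + 1 ≤ j + 1 := h2
    simp [this]

theorem pcount_zero (k : Nat) : pcount 0 k = 1 := by rw [pcount]

theorem pcount_zero_right (x : Nat) : pcount x 0 = if x = 0 then 1 else 0 := by
  match x with
  | 0 => rw [pcount]; simp
  | j + 1 => rw [pcount]; simp

-- Int-index version of pyGetD_pySetD_natCast (used on the A side).
theorem pyGetD_pySetD_int (xs : List Int) (i : Int) (v : Int) (m : Int) (d : Int)
    (h0 : 0 ≤ i) (h1 : i < xs.length) (hm : 0 ≤ m) :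
    PySem.List.pyGetD (PySem.List.pySetD xs i v) m d
      = if m = i then v else PySem.List.pyGetD xs m d := by
  rw [show i = ((i.toNat : Nat) : Int) by omega, show m = ((m.toNat : Nat) : Int) by omega]
  rw [PySem.List.pyGetD_pySetD_natCast xs i.toNat m.toNat v d (by omega)]
  by_cases h : m.toNat = i.toNat
  · rw [if_pos h, if_pos (by exact_mod_cast h)]
  · rw [if_neg h, if_neg (show ¬ ((m.toNat : Nat) : Int) = ((i.toNat : Nat) : Int) by omega)]

-- ----- A side -----

theorem innerA (n k i : Int) (hi2 : 2 ≤ i) (hik : i ≤ k) (hkn : k < n) :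
    ∀ (c : Nat) (a : Int) (p : List Int), c = (n - i + 2 - a).toNat → i + 1 ≤ a →
    p.length = n.toNat →
    (∀ m : Int, 1 ≤ m → m < a → m ≤ n - i + 1 →
      PySem.List.pyGetD p m 0 = pcount (m - 1).toNat i.toNat) →
    (∀ m : Int, a ≤ m → m ≤ n - i + 2 → m ≤ n - 1 →
      PySem.List.pyGetD p m 0 = pcount (m - 1).toNat (i - 1).toNat) →
    ((PySem.List.pyRange a (n - i + 1 + 1) 1).foldl (fun q m =>
        PySem.List.pySetD q m (PySem.List.pyGetD q m 0 + PySem.List.pyGetD q (m - i) 0)) p).length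
        = n.toNat ∧
    ∀ m : Int, 1 ≤ m → m ≤ n - i + 1 →
      PySem.List.pyGetD ((PySem.List.pyRange a (n - i + 1 + 1) 1).foldl (fun q m =>
        PySem.List.pySetD q m (PySem.List.pyGetD q m 0 + PySem.List.pyGetD q (m - i) 0)) p) m 0
        = pcount (m - 1).toNat i.toNat := by
  intro c
  induction c with
  | zero =>
    intro a p hc ha hlen hdone htodo
    rw [PySem.List.pyRange_one_eq_nil (show n - i + 1 + 1 ≤ a by omega)]
    exact ⟨hlen, fun m hm1 hmn => hdone m hm1 (by omega) hmn⟩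
  | succ c ih =>
    intro a p hc ha hlen hdone htodo
    have han : a < n - i + 1 + 1 := by omega
    rw [PySem.List.pyRange_one_cons han]
    simp only [List.foldl_cons]
    have hva : PySem.List.pyGetD p a 0 + PySem.List.pyGetD p (a - i) 0
        = pcount (a - 1).toNat i.toNat := by
      rw [htodo a (by omega) (by omega) (by omega),
        hdone (a - i) (by omega) (by omega) (by omega),
        pcount_step (a - 1).toNat i.toNat (by omega) (by omega),
        show i.toNat - 1 = (i - 1).toNat by omega,
        show (a - 1).toNat - i.toNat = (a - i - 1).toNat by omega]
    apply ih (a + 1) _ (by omega) (by omega)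
    · rw [PySem.List.length_pySetD, hlen]
    · intro m hm1 hma hmn
      rw [pyGetD_pySetD_int p a _ m 0 (by omega) (by omega) (by omega)]
      by_cases hme : m = a
      · rw [if_pos hme, hme, hva]
      · rw [if_neg hme]
        exact hdone m hm1 (by omega) hmn
    · intro m hma hmn hmn1
      rw [pyGetD_pySetD_int p a _ m 0 (by omega) (by omega) (by omega)]
      rw [if_neg (by omega)]
      exact htodo m (by omega) hmn hmn1

theorem outerA (n k : Int) (hk : 2 ≤ k) (hkn : k < n) :
    ∀ (c : Nat) (i : Int) (p : List Int), c = (k + 1 - i).toNat → 2 ≤ i → i ≤ k + 1 →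
    p.length = n.toNat →
    (∀ m : Int, 1 ≤ m → m ≤ n - i + 2 → m ≤ n - 1 →
      PySem.List.pyGetD p m 0 = pcount (m - 1).toNat (i - 1).toNat) →
    ∀ m : Int, 1 ≤ m → m ≤ n - k + 1 →
      PySem.List.pyGetD ((PySem.List.pyRange i (k + 1) 1).foldl (fun p i =>
        (PySem.List.pyRange (i + 1) (n - i + 1 + 1) 1).foldl (fun q m =>
          PySem.List.pySetD q m (PySem.List.pyGetD q m 0 + PySem.List.pyGetD q (m - i) 0)) p) p) m 0
        = pcount (m - 1).toNat k.toNat := by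
  intro c
  induction c with
  | zero =>
    intro i p hc h2i hik1 hlen hinv m hm1 hmk
    rw [PySem.List.pyRange_one_eq_nil (show k + 1 ≤ i by omega)]
    simp only [List.foldl_nil]
    rw [show k.toNat = (i - 1).toNat by omega]
    exact hinv m hm1 (by omega) (by omega)
  | succ c ih =>
    intro i p hc h2i hik1 hlen hinv m hm1 hmk
    rw [PySem.List.pyRange_one_cons (show i < k + 1 by omega)]
    simp only [List.foldl_cons]
    have hd : ∀ m : Int, 1 ≤ m → m < i + 1 → m ≤ n - i + 1 →
        PySem.List.pyGetD p m 0 = pcount (m - 1).toNat i.toNat := by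
      intro m hm1 hma hmn
      rw [show i.toNat = (i - 1).toNat + 1 by omega,
        pcount_stable (m - 1).toNat (i - 1).toNat (by omega)]
      exact hinv m hm1 (by omega) (by omega)
    have ht : ∀ m : Int, i + 1 ≤ m → m ≤ n - i + 2 → m ≤ n - 1 →
        PySem.List.pyGetD p m 0 = pcount (m - 1).toNat (i - 1).toNat :=
      fun m hma hmn hmn1 => hinv m (by omega) hmn hmn1
    obtain ⟨hlen', hinv'⟩ :=
      innerA n k i h2i (by omega) hkn _ (i + 1) p rfl (le_refl _) hlen hd ht
    refine ih (i + 1) _ (by omega) (by omega) (by omega) hlen' ?_ m hm1 hmk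
    intro m hm1 hmn hmn1
    rw [show (i + 1 - 1).toNat = i.toNat by omega]
    exact hinv' m hm1 (by omega)

theorem A_value (N S : Int) (h2 : 2 ≤ S) (hlt : S < N) :
    NrParts N S = pcount (N - S).toNat S.toNat := by
  have g1 : ¬ (N = S ∨ S = 1) := by rintro (h | h) <;> omega
  have g2 : ¬ (N < S ∨ S = 0) := by rintro (h | h) <;> omega
  simp only [NrParts, if_neg g1, if_neg g2]
  have hbase : ∀ m : Int, 1 ≤ m → m ≤ N - 2 + 2 → m ≤ N - 1 →
      PySem.List.pyGetD (List.replicate N.toNat (1 : Int)) m 0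
        = pcount (m - 1).toNat ((2 : Int) - 1).toNat := by
    intro m hm1 hm2 hm3
    rw [PySem.List.pyGetD_eq_getElem (List.replicate N.toNat (1 : Int)) 0 (by omega) (by simp; omega)]
    simp [pcount_one]
  have h := outerA N S h2 hlt _ 2 (List.replicate N.toNat (1 : Int)) rfl (by omega)
    (by omega) (by simp) hbase (N - S + 1) (by omega) (by omega)
  rw [show N - S + 1 - 1 = N - S by ring] at h
  exact h

-- ----- B side -----

-- Row value: number of partitions of m into exactly j parts.
def erow (j m : Int) : Int := if j ≤ m then pcount (m - j).toNat j.toNat else 0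

theorem erow_rec (j a : Int) (h1 : 1 ≤ j) (h2 : j ≤ a) :
    erow j a = erow (j - 1) (a - 1) + erow j (a - j) := by
  unfold erow
  rw [if_pos h2, if_pos (show j - 1 ≤ a - 1 by omega)]
  by_cases hc : a = j
  · rw [if_neg (show ¬ (j ≤ a - j) by omega)]
    rw [show (a - j).toNat = 0 by omega, show (a - 1 - (j - 1)).toNat = 0 by omega,
      pcount_zero, pcount_zero]
    ring
  · obtain ⟨u, hu⟩ : ∃ u : Nat, (a - j).toNat = u + 1 := ⟨(a - j).toNat - 1, by omega⟩
    obtain ⟨t, ht⟩ : ∃ t : Nat, j.toNat = t + 1 := ⟨j.toNat - 1, by omega⟩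
    rw [hu, ht, pcount]
    rw [show (a - 1 - (j - 1)).toNat = u + 1 by omega, show (j - 1).toNat = t by omega]
    by_cases hd : j ≤ a - j
    · rw [if_pos hd, if_pos (show t + 1 ≤ u + 1 by omega)]
      rw [show (a - j - j).toNat = u - t by omega]
    · rw [if_neg hd, if_neg (show ¬ (t + 1 ≤ u + 1) by omega)]

-- pyGetD inside the left part of an append.
theorem pyGetD_append_lt (xs ys : List Int) (i d : Int) (h0 : 0 ≤ i) (h : i < xs.length) :
    PySem.List.pyGetD (xs ++ ys) i d = PySem.List.pyGetD xs i d := by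
  rw [PySem.List.pyGetD_eq_getElem (xs ++ ys) d h0 (by simp; omega),
    PySem.List.pyGetD_eq_getElem xs d h0 (by omega)]
  rw [List.getElem_append_left (by omega)]

-- pyGetD at the freshly appended position.
theorem pyGetD_append_last (xs : List Int) (v d : Int) :
    PySem.List.pyGetD (xs ++ [v]) (xs.length : Int) d = v := by
  rw [PySem.List.pyGetD_eq_getElem (xs ++ [v]) d (by omega) (by simp)]
  simp

theorem innerB (n j : Int) (hj : 1 ≤ j) (row : List Int)
    (hrow : ∀ m : Int, 0 ≤ m → m ≤ n → PySem.List.pyGetD row m 0 = erow (j - 1) m) :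
    ∀ (c : Nat) (m : Int) (new : List Int), 0 ≤ m → (c : Int) + m = n + 1 →
    new.length = m.toNat →
    (∀ m' : Int, 0 ≤ m' → m' < m → PySem.List.pyGetD new m' 0 = erow j m') →
    (pvInnerB row j n c m new).length = (n + 1).toNat ∧
    ∀ m' : Int, 0 ≤ m' → m' ≤ n →
      PySem.List.pyGetD (pvInnerB row j n c m new) m' 0 = erow j m' := by
  intro c
  induction c with
  | zero =>
    intro m new hm0 hc hlen hdone
    rw [pvInnerB]
    exact ⟨by omega, fun m' h0 hn => hdone m' h0 (by omega)⟩
  | succ c ih =>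
    intro m new hm0 hc hlen hdone
    rw [pvInnerB]
    have hv : (if j ≤ m then
        PySem.List.pyGetD row (m - 1) 0 + PySem.List.pyGetD new (m - j) 0 else 0)
        = erow j m := by
      by_cases hjm : j ≤ m
      · rw [if_pos hjm, hrow (m - 1) (by omega) (by omega),
          hdone (m - j) (by omega) (by omega), ← erow_rec j m hj hjm]
      · rw [if_neg hjm]
        unfold erow
        rw [if_neg hjm]
    apply ih (m + 1) _ (by omega) (by omega)
    · rw [List.length_append, hlen]; simp; omega
    · intro m' h0 hlt
      by_cases hme : m' = m
      · have hlm : m = ((new.length : Nat) : Int) := by omega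
        rw [hlm] at hv
        rw [hme, hlm, pyGetD_append_last, hv]
      · rw [pyGetD_append_lt new _ m' 0 h0 (by omega)]
        exact hdone m' h0 (by omega)

theorem outerB (n k : Int) :
    ∀ (c : Nat) (j : Int) (row : List Int), 1 ≤ j → (c : Int) + j = k + 1 →
    (∀ m : Int, 0 ≤ m → m ≤ n → PySem.List.pyGetD row m 0 = erow (j - 1) m) →
    ∀ m : Int, 0 ≤ m → m ≤ n →
      PySem.List.pyGetD (pvOuterB k n c j row) m 0 = erow k m := by
  intro c
  induction c with
  | zero =>
    intro j row hj1 hc hrow m hm0 hmn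
    rw [pvOuterB]
    rw [show (k : Int) = j - 1 by omega]
    exact hrow m hm0 hmn
  | succ c ih =>
    intro j row hj1 hc hrow m hm0 hmn
    rw [pvOuterB]
    obtain ⟨hlen', hinv'⟩ :=
      innerB n j hj1 row hrow (n + 1).toNat 0 [] (le_refl 0) (by omega) (by simp)
        (fun m' h0 hlt => absurd hlt (by omega))
    refine ih (j + 1) _ (by omega) (by omega) ?_ m hm0 hmn
    intro m' h0 hn
    rw [show (j : Int) + 1 - 1 = j by ring]
    exact hinv' m' h0 hn

theorem B_value (N S : Int) (h2 : 2 ≤ S) (hlt : S < N) :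
    NrParts_alt N S = pcount (N - S).toNat S.toNat := by
  have g1 : ¬ (N = S ∨ S = 1) := by rintro (h | h) <;> omega
  have g2 : ¬ (N < S ∨ S = 0) := by rintro (h | h) <;> omega
  simp only [NrParts_alt, if_neg g1, if_neg g2]
  have hbase : ∀ m : Int, 0 ≤ m → m ≤ N →
      PySem.List.pyGetD (1 :: List.replicate N.toNat (0 : Int)) m 0 = erow (1 - 1) m := by
    intro m hm0 hmn
    obtain ⟨t, rfl⟩ : ∃ t : Nat, m = (t : Int) := ⟨m.toNat, by omega⟩
    rw [PySem.List.pyGetD_natCast]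
    unfold erow
    rw [show (1 : Int) - 1 = 0 by ring, if_pos hm0, show ((0:Int)).toNat = 0 by rfl,
      show (t : Int) - 0 = (t : Int) by ring, show ((t : Int)).toNat = t by omega,
      pcount_zero_right]
    cases t with
    | zero => rw [if_pos rfl]; rfl
    | succ t =>
      rw [if_neg (by omega)]
      simp
  have h := outerB N S S.toNat 1 (1 :: List.replicate N.toNat 0) (le_refl 1)
    (by omega) hbase N (by omega) (le_refl N)
  rw [h]
  unfold erow
  rw [if_pos (by omega)]

-- ===== VERDICT (by name: the statement is the Claim_ definition above) =====
theorem NrParts_spec : Claim_equal_NrParts := by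
  intro N S _hD hPre
  unfold Spec_NrParts
  by_cases h1 : N = S ∨ S = 1
  · simp [NrParts, NrParts_alt, h1]
  · by_cases h2 : N < S ∨ S = 0
    · simp [NrParts, NrParts_alt, h1, h2]
    · have hS : 2 ≤ S := by
        rcases hPre with h | h <;> omega
      have hlt : S < N := by omega
      rw [A_value N S hS hlt, B_value N S hS hlt]
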